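-- pv_equiv track=rewrite | github.com/Lauriy/advent-of-code-2025 | src/day_6.py | identify_separators
-- ===== SOURCE A (Python) =====
-- def identify_separators(grid: list[str]) -> list[bool]:
--     """Identify which columns contain only spaces (separators)."""
--     if not grid:
--         return []
--
--     num_cols = len(grid[0]) if grid else 0
--     is_separator = []
--
--     for col_idx in range(num_cols):
--         all_spaces = all(col_idx >= len(row) or row[col_idx] == " " for row in grid)
--         is_separator.append(all_spaces)
--
--     return is_separator
-- ===== SOURCE B (Python) =====
-- def identify_separators(grid: list[str]) -> list[bool]:
--     """Identify which columns contain only spaces (separators)."""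
--     if not grid:
--         return []
--
--     num_cols = len(grid[0])
--     result = [True] * num_cols
--     for row in grid:
--         for col in range(min(len(row), num_cols)):
--             if row[col] != " ":
--                 result[col] = False
--     return result
-- ===== Notes on version B (the rewrite author's own statement) =====
-- stated objective: alternative
-- what changed: Row-major single pass that starts with all-True flags and clears a flag on the first non-space seen in a column, instead of a column-major recomputation with all() per column.
import Mathlib
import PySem

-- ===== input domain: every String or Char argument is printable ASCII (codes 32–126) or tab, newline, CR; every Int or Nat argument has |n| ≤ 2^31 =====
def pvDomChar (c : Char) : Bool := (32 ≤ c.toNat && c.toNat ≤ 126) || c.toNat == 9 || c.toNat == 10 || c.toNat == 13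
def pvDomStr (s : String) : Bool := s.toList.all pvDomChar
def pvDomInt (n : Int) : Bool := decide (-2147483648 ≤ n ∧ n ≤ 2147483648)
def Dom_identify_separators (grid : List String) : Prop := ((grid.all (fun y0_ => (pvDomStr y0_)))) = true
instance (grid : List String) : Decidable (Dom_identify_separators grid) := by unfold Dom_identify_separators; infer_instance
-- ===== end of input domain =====

-- B replaces the column-major all()-per-column scan with a row-major pass that
-- clears an all-True flag list on each non-space character (alternative decomposition, same cost).


-- ===== PORT A =====
-- column-major: for each col in range(num_cols), all(col >= len(row) or row[col] == ' ')
def identify_separators (grid : List String) : List Bool :=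
  match grid with
  | [] => []
  | r0 :: _ =>
    (List.range r0.toList.length).map (fun col =>
      grid.all (fun row =>
        decide (row.toList.length ≤ col) || (row.toList.getD col ' ' == ' ')))

-- ===== PORT B =====
-- inner loop of B: for col in range(min(len(row), num_cols)): if row[col] != ' ': result[col] = False
def pvProcRow (num_cols : Nat) (res : List Bool) (row : String) : List Bool :=
  (List.range (min row.toList.length num_cols)).foldl
    (fun r col => if (row.toList.getD col ' ' == ' ') = false then r.set col false else r) res

-- row-major: result = [True]*num_cols, cleared in place
def identify_separators_alt (grid : List String) : List Bool :=
  match grid with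
  | [] => []
  | r0 :: _ => grid.foldl (pvProcRow r0.toList.length) (List.replicate r0.toList.length true)

-- ===== PRECONDITION & SPEC =====
def Spec_identify_separators (grid : List String) (out : List Bool) : Prop := out = identify_separators_alt grid
instance (grid : List String) (out : List Bool) : Decidable (Spec_identify_separators grid out) := by unfold Spec_identify_separators; infer_instance

-- ===== CLAIM (what is proved, stated in full; the proofs are below) =====
def Claim_equal_identify_separators : Prop := ∀ (grid : List String), Dom_identify_separators grid → Spec_identify_separators grid (identify_separators grid)

-- ===== LEMMAS AND PROOFS =====

-- effect of one inner loop (a fold of conditional List.set over a range) on one cell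
theorem pvFoldSet_getElem? (p : Nat → Bool) (L : List Nat) (res : List Bool) (j : Nat) :
    (L.foldl (fun r col => if p col = true then r.set col false else r) res)[j]? =
      if j ∈ L ∧ p j = true then res[j]?.map (fun _ => false) else res[j]? := by
  induction L generalizing res with
  | nil => simp
  | cons c L ih =>
    simp only [List.foldl_cons, ih, List.mem_cons]
    by_cases hpc : p c = true
    · simp only [hpc, if_true]
      by_cases hcj : c = j
      · subst hcj
        by_cases hj : c < res.length
        · simp [hj, hpc]
        · simp [hj, hpc]
      · have hjc : j ≠ c := fun h => hcj h.symm
        simp [List.getElem?_set_ne hcj, hjc]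
    · simp only [hpc]
      by_cases hcj : c = j
      · subst hcj; simp [hpc]
      · have hjc : j ≠ c := fun h => hcj h.symm
        simp [hjc]

theorem pvFoldSet_length (p : Nat → Bool) (L : List Nat) (res : List Bool) :
    (L.foldl (fun r col => if p col = true then r.set col false else r) res).length = res.length := by
  induction L generalizing res with
  | nil => rfl
  | cons c L ih => simp only [List.foldl_cons]; rw [ih]; split <;> simp

theorem pvProcRow_length (nc : Nat) (res : List Bool) (row : String) :
    (pvProcRow nc res row).length = res.length := by
  unfold pvProcRow
  rw [show (fun (r : List Bool) col => if (row.toList.getD col ' ' == ' ') = false then r.set col false else r)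
        = (fun (r : List Bool) col => if (!(row.toList.getD col ' ' == ' ')) = true then r.set col false else r) from by
      funext r col; simp]
  exact pvFoldSet_length _ _ _

theorem pvFold_length (nc : Nat) (grid : List String) (res : List Bool) :
    (grid.foldl (pvProcRow nc) res).length = res.length := by
  induction grid generalizing res with
  | nil => rfl
  | cons row grid ih => simp only [List.foldl_cons]; rw [ih, pvProcRow_length]

theorem pvProcRow_getElem? (nc : Nat) (res : List Bool) (row : String) (j : Nat) (hj : j < nc) :
    (pvProcRow nc res row)[j]? =
      res[j]?.map (fun b => b && (decide (row.toList.length ≤ j) || (row.toList.getD j ' ' == ' '))) := by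
  unfold pvProcRow
  rw [show (fun (r : List Bool) col => if (row.toList.getD col ' ' == ' ') = false then r.set col false else r)
        = (fun (r : List Bool) col => if (!(row.toList.getD col ' ' == ' ')) = true then r.set col false else r) from by
      funext r col; simp]
  rw [pvFoldSet_getElem?]
  cases hres : res[j]? with
  | none => split <;> simp
  | some b =>
    simp only [List.mem_range, Nat.lt_min, hj, and_true, Bool.not_eq_true', Option.map_some]
    by_cases hl : j < row.toList.length
    · obtain ⟨ch, hx⟩ : ∃ ch, row.toList[j]? = some ch := ⟨_, List.getElem?_eq_getElem hl⟩
      simp only [List.getD, hx, Option.getD_some]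
      by_cases hch : ch = ' '
      · simp [hch]
      · have hbe : (ch == ' ') = false := by simpa using hch
        have hl2 : j < row.length := by simpa using hl
        simp [hbe, hl2, Nat.not_le.2 hl2]
    · have hl' : row.length ≤ j := by simpa using le_of_not_gt hl
      simp [Nat.not_lt.2 hl', hl']

theorem pvFold_getElem? (nc : Nat) (grid : List String) (res : List Bool) (j : Nat) (hj : j < nc) :
    (grid.foldl (pvProcRow nc) res)[j]? =
      res[j]?.map (fun b => b && grid.all (fun row =>
        decide (row.toList.length ≤ j) || (row.toList.getD j ' ' == ' '))) := by
  induction grid generalizing res with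
  | nil => cases h : res[j]? <;> simp [h]
  | cons row grid ih =>
    simp only [List.foldl_cons]
    rw [ih, pvProcRow_getElem? nc res row j hj]
    cases h : res[j]? <;> simp [Bool.and_assoc]

-- ===== VERDICT (by name: the statement is the Claim_ definition above) =====
theorem identify_separators_spec : Claim_equal_identify_separators := by
  intro grid _
  unfold Spec_identify_separators identify_separators identify_separators_alt
  cases grid with
  | nil => rfl
  | cons r0 rest =>
    apply List.ext_getElem?
    intro j
    by_cases hj : j < r0.toList.length
    · rw [pvFold_getElem? _ _ _ j hj]
      have hj' : j < r0.length := by simpa using hj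
      simp [hj']
    · have h1 : ((List.range r0.toList.length).map (fun col =>
          (r0 :: rest).all (fun row =>
            decide (row.toList.length ≤ col) || (row.toList.getD col ' ' == ' '))))[j]? = none := by
        apply List.getElem?_eq_none; simpa using le_of_not_gt hj
      have h2 : ((r0 :: rest).foldl (pvProcRow r0.toList.length)
          (List.replicate r0.toList.length true))[j]? = none := by
        apply List.getElem?_eq_none
        rw [pvFold_length]; simpa using le_of_not_gt hj
      rw [h1, h2]
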